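-- pv_equiv track=rewrite | github.com/SriDaCoder/GAIA | Προμηθεύς/api.py | from_base40
-- ===== SOURCE A (Python) =====
-- base40chars = "0123456789ABCDEFGHIJKLMNOPQRSTUVWXYZ@#$%"
--
-- def from_base40(s):
--     s = s.upper()
--     num = 0
--     for ch in s:
--         val = base40chars.find(ch)
--         if val == -1:
--             return None
--         num = num * 40 + val
--     return str(num)
-- ===== SOURCE B (Python) =====
-- base40chars = "0123456789ABCDEFGHIJKLMNOPQRSTUVWXYZ@#$%"
--
-- def from_base40(s):
--     s = s.upper()
--     if any(ch not in base40chars for ch in s):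
--         return None
--     num = 0
--     p = 1
--     for ch in reversed(s):
--         num += base40chars.find(ch) * p
--         p *= 40
--     return str(num)
-- ===== Notes on version B (the rewrite author's own statement) =====
-- stated objective: alternative
-- what changed: Replaces A's single Horner left-fold with early return by a separate validation pass (any char not in base40chars -> None) followed by a place-value power sum accumulated over the reversed string with a running multiplier.
import Mathlib
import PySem

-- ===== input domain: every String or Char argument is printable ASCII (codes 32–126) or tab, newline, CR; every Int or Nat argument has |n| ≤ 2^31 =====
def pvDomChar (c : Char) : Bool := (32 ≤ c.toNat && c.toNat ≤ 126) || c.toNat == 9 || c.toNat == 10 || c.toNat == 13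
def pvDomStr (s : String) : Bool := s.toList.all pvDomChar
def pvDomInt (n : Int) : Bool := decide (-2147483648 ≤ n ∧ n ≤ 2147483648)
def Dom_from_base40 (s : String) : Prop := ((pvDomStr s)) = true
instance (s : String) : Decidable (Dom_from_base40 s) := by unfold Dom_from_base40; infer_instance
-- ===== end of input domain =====

-- B replaces A's single Horner left-fold with a separate validation pass followed by a
-- place-value power sum over the reversed string (objective: alternative decomposition).

def base40chars : List Char := "0123456789ABCDEFGHIJKLMNOPQRSTUVWXYZ@#$%".toList

-- ===== PORT A =====
-- Horner loop with early return None on the first invalid character.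
def fromBase40Loop : List Char → Int → Option Int
  | [], num => some num
  | ch :: rest, num =>
    let val := PySem.Chars.find base40chars [ch]
    if val = -1 then none
    else fromBase40Loop rest (num * 40 + val)

def from_base40 (s : String) : Option String :=
  match fromBase40Loop (PySem.Str.upper s).toList 0 with
  | none => none
  | some num => some (PySem.Int.toStr num)

-- ===== PORT B =====
-- validate first, then accumulate value * place over the reversed string
def from_base40_alt (s : String) : Option String :=
  let t := (PySem.Str.upper s).toList
  if t.any (fun ch => !(PySem.Chars.isIn [ch] base40chars)) then none
  else
    let r := t.reverse.foldl
      (fun (acc : Int × Int) ch =>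
        (acc.1 + PySem.Chars.find base40chars [ch] * acc.2, acc.2 * 40))
      (0, 1)
    some (PySem.Int.toStr r.1)

-- ===== PRECONDITION & SPEC =====
def Spec_from_base40 (s : String) (out : Option String) : Prop := out = from_base40_alt s
instance (s : String) (out : Option String) : Decidable (Spec_from_base40 s out) := by unfold Spec_from_base40; infer_instance

-- ===== CLAIM (what is proved, stated in full; the proofs are below) =====
def Claim_equal_from_base40 : Prop := ∀ (s : String), Dom_from_base40 s → Spec_from_base40 s (from_base40 s)

-- ===== LEMMAS AND PROOFS =====

-- B's loop body
def bStep (acc : Int × Int) (ch : Char) : Int × Int :=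
  (acc.1 + PySem.Chars.find base40chars [ch] * acc.2, acc.2 * 40)

lemma bStep_eq : (fun (acc : Int × Int) ch =>
      (acc.1 + PySem.Chars.find base40chars [ch] * acc.2, acc.2 * 40)) = bStep := rfl

lemma bfold_snd (m : List Char) : ∀ num p : Int,
    (m.foldl bStep (num, p)).2 = p * 40 ^ m.length := by
  induction m with
  | nil => intro num p; simp
  | cons c m ih =>
    intro num p
    simp only [List.foldl_cons, bStep]
    rw [ih, List.length_cons]
    ring

lemma bfold_append (m : List Char) (c : Char) :
    (List.foldl bStep (0, 1) (m ++ [c])).1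
      = (m.foldl bStep (0, 1)).1 + PySem.Chars.find base40chars [c] * 40 ^ m.length := by
  rw [List.foldl_append]
  simp only [List.foldl_cons, List.foldl_nil, bStep]
  have h2 : (m.foldl bStep (0, 1)).2 = 40 ^ m.length := by
    simpa using bfold_snd m 0 1
  rw [h2]

lemma valid_iff (c : Char) :
    PySem.Chars.find base40chars [c] = -1 ↔ (PySem.Chars.isIn [c] base40chars) = false := by
  rw [PySem.Chars.find_eq_neg_one_iff, PySem.Chars.isIn_eq_false_iff]

lemma loop_eq (l : List Char) : ∀ num : Int,
    fromBase40Loop l num =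
      if l.all (fun ch => PySem.Chars.isIn [ch] base40chars) then
        some (num * 40 ^ l.length + (l.reverse.foldl bStep (0, 1)).1)
      else none := by
  induction l with
  | nil => intro num; simp [fromBase40Loop]
  | cons c l ih =>
    intro num
    simp only [fromBase40Loop]
    by_cases h : PySem.Chars.find base40chars [c] = -1
    · have hv : PySem.Chars.isIn [c] base40chars = false := (valid_iff c).mp h
      simp [h, hv]
    · have hv : PySem.Chars.isIn [c] base40chars = true := by
        rcases Bool.eq_false_or_eq_true (PySem.Chars.isIn [c] base40chars) with ht | hf
        · exact ht
        · exact absurd ((valid_iff c).mpr hf) h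
      rw [if_neg h, ih]
      simp only [List.all_cons, hv, Bool.true_and, List.reverse_cons, List.length_cons]
      by_cases hall : l.all (fun ch => PySem.Chars.isIn [ch] base40chars) = true
      · rw [if_pos hall, if_pos hall]
        rw [bfold_append l.reverse c]
        simp only [List.length_reverse]
        congr 1
        ring
      · rw [if_neg hall, if_neg hall]

-- ===== VERDICT (by name: the statement is the Claim_ definition above) =====
theorem from_base40_spec : Claim_equal_from_base40 := by
  unfold Claim_equal_from_base40
  intro s _
  unfold Spec_from_base40 from_base40 from_base40_alt
  rw [loop_eq]
  rw [bStep_eq]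
  set t := (PySem.Str.upper s).toList with ht
  have hany : (t.any fun ch => !(PySem.Chars.isIn [ch] base40chars))
      = !(t.all fun ch => PySem.Chars.isIn [ch] base40chars) := by
    simp [List.any_eq_not_all_not]
  by_cases hall : (t.all fun ch => PySem.Chars.isIn [ch] base40chars) = true
  · rw [if_pos hall]
    simp only [hany, hall, Bool.not_true, Bool.false_eq_true, if_false]
    norm_num
  · rw [if_neg hall]
    simp only [hany, Bool.not_eq_true] at *
    simp [hall]
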